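-- pv_equiv track=rewrite | github.com/RationalityEnhancement/InterpretableStrategyDiscovery | DNF2LTL/formula_procedure_transformation.py | is_included_loop
-- ===== SOURCE A (Python) =====
-- import copy
--
-- def is_included(s1, s2):
--     """
--     Check if s1 is included in s2 so that higher the index of an element in s1,
--     the higher it is in s2. In other words, the ordering is kept.
--
--     Parameters
--     ----------
--     s1 : [ any ]
--         List of elements
--     s2 : [ any ]
--         List of elements
--
--     Returns
--     -------
--     bool
--         Whether the s1 is a subset of s2 with the same ordering as in s2
--     """
--     search_ind = 0
--     for e in s1:
--         broke = False
--         for i in range(search_ind, len(s2)):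
--             if e == s2[i]:
--                 search_ind = i
--                 broke = True
--                 break
--         if not broke: return False
--     return True
--
-- def is_included_loop(el, loop_format_rep):
--     """
--     Rollout a sequence of elements of the format a_1, ..., (a_i, ..., a_n)*.
--
--     Check if el is included in the rollouted sequence. See is_included.
--
--     Parameters
--     ----------
--     el : [ any ]
--         List of elements
--     loop_format_rep : [ any, str ]
--         List of elements ending with LOOP FROM el for some element el in the list
--
--     Returns
--     -------
--     bool
--         Whether the s1 is a subset of s2 with the same ordering as in s2
--     """
--     copy_rep = copy.deepcopy(loop_format_rep)
--     if "LOOP" in loop_format_rep[-1]: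
--         repeat = loop_format_rep[-1][10:]
--         ind_repeat = loop_format_rep.index(repeat)
--         copy_rep = copy.deepcopy(loop_format_rep)[:-1]
--         #while len(el) >= len(copy_rep[:-1]):
--         #    copy_rep += copy_rep[ind_repeat:]
--         for _ in range(len(el)):
--             copy_rep += copy_rep[ind_repeat:]
--     return is_included(el, copy_rep)
-- ===== SOURCE B (Python) =====
-- def is_included_loop(el, loop_format_rep):
--     last = loop_format_rep[-1]
--     if "LOOP" in last:
--         repeat = last[10:]
--         ind_repeat = loop_format_rep.index(repeat)
--         base, start, wraps = loop_format_rep[:-1], ind_repeat, len(el)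
--     else:
--         base, start, wraps = loop_format_rep, 0, 0
--     pos = 0
--     for e in el:
--         while True:
--             if pos < len(base):
--                 if base[pos] == e:
--                     break
--                 pos += 1
--             elif wraps == 0 or start >= len(base):
--                 return False
--             else:
--                 wraps -= 1
--                 pos = start
--     return True
-- ===== Notes on version B (the rewrite author's own statement) =====
-- stated objective: faster
-- what changed: A unrolls the loop by repeatedly appending copy_rep[ind_repeat:] (the materialized sequence doubles len(el) times, i.e. grows to ~2^len(el) copies of the cycle) and then scans it; B never materializes anything: it walks one wrap-around search pointer over loop_format_rep[:-1], jumping back to ind_repeat at the end with a total wrap budget of len(el).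
import Mathlib
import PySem

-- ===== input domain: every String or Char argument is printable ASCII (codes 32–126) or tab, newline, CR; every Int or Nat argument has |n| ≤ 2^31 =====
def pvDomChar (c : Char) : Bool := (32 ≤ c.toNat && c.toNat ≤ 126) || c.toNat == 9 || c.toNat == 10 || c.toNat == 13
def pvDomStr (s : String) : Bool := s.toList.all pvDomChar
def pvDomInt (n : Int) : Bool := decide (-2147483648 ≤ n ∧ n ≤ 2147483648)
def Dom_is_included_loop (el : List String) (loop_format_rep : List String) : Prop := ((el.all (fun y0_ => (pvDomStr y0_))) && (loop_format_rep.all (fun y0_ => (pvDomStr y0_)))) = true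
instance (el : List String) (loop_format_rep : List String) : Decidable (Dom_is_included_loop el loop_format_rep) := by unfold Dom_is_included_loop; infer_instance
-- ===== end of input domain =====

-- B replaces A's unrolling (copy_rep += copy_rep[ind_repeat:], repeated len(el) times, so the
-- materialized list reaches ~2^len(el) cycle copies) by a wrap-around search pointer over
-- loop_format_rep[:-1] with a total wrap budget of len(el); nothing is materialized.

-- ===== PORT A =====
-- inner 'for i in range(search_ind, len(s2)): if e == s2[i]: … break' of is_included
def pyFindFrom (s2 : List String) (e : String) (i : Nat) : Option Nat :=
  if h : i < s2.length then
    if s2[i] = e then some i else pyFindFrom s2 e (i + 1)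
  else none
termination_by s2.length - i

-- outer 'for e in s1' of is_included, carrying search_ind (A keeps search_ind = i, not i+1)
def isIncludedGo (s2 : List String) : List String → Nat → Bool
  | [], _ => true
  | e :: rest, si =>
    match pyFindFrom s2 e si with
    | some i => isIncludedGo s2 rest i
    | none => false

def is_included (s1 s2 : List String) : Bool := isIncludedGo s2 s1 0

-- 'for _ in range(len(el)): copy_rep += copy_rep[ind_repeat:]'
def unrollRep (indR : Nat) : Nat → List String → List String
  | 0, cur => cur
  | k + 1, cur => unrollRep indR k (cur ++ cur.drop indR)

def is_included_loop (el : List String) (loop_format_rep : List String) : Bool :=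
  match PySem.List.pyGet? loop_format_rep (-1) with
  | none => false   -- IndexError on empty list; excluded by Pre_
  | some last =>
    if PySem.Str.isIn "LOOP" last then
      match PySem.List.index? loop_format_rep (PySem.Str.slice last (some 10) none) with
      | none => false  -- ValueError from .index; excluded by Pre_
      | some indR =>
        is_included el (unrollRep indR el.length (PySem.List.slice loop_format_rep none (some (-1))))
    else is_included el loop_format_rep

-- ===== PORT B =====
-- the 'while True' search for one element: scan base from pos; at the end wrap to start (budget w)
def scanWrap (base : List String) (indR : Nat) (e : String) (pos w : Nat) : Option (Nat × Nat) :=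
  if h : pos < base.length then
    if base[pos] = e then some (pos, w)
    else scanWrap base indR e (pos + 1) w
  else
    match w with
    | 0 => none
    | w' + 1 => if indR < base.length then scanWrap base indR e indR w' else none
termination_by (w, base.length - pos)
decreasing_by
  · exact Prod.Lex.right _ (by omega)
  · exact Prod.Lex.left _ _ (by omega)

-- the 'for e in el' loop of B, threading (pos, wraps)
def wrapMatch (base : List String) (indR : Nat) : List String → Nat → Nat → Bool
  | [], _, _ => true
  | e :: rest, pos, w =>
    match scanWrap base indR e pos w with
    | some (p, w') => wrapMatch base indR rest p w'
    | none => false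

def is_included_loop_alt (el : List String) (loop_format_rep : List String) : Bool :=
  match PySem.List.pyGet? loop_format_rep (-1) with
  | none => false   -- IndexError on empty list; excluded by Pre_
  | some last =>
    if PySem.Str.isIn "LOOP" last then
      match PySem.List.index? loop_format_rep (PySem.Str.slice last (some 10) none) with
      | none => false  -- ValueError from .index; excluded by Pre_
      | some indR =>
        wrapMatch (PySem.List.slice loop_format_rep none (some (-1))) indR el 0 el.length
    else wrapMatch loop_format_rep 0 el 0 0

-- ===== PRECONDITION & SPEC =====
-- Pre_ excludes exactly the inputs where A raises: the empty list (IndexError on [-1]) and a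
-- last element containing "LOOP" whose [10:] suffix is absent from the list (ValueError from .index).
def Pre_is_included_loop (el : List String) (loop_format_rep : List String) : Prop :=
  loop_format_rep ≠ [] ∧
    (PySem.Str.isIn "LOOP" (loop_format_rep.getLast?.getD "") = true →
      PySem.Str.slice (loop_format_rep.getLast?.getD "") (some 10) none ∈ loop_format_rep)
instance (el : List String) (loop_format_rep : List String) : Decidable (Pre_is_included_loop el loop_format_rep) := by unfold Pre_is_included_loop; infer_instance

def pvWitness_is_included_loop : List String × List String := (["a"], ["a", "b", "LOOP FROM a"])

def Spec_is_included_loop (el : List String) (loop_format_rep : List String) (out : Bool) : Prop := out = is_included_loop_alt el loop_format_rep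
instance (el : List String) (loop_format_rep : List String) (out : Bool) : Decidable (Spec_is_included_loop el loop_format_rep out) := by unfold Spec_is_included_loop; infer_instance

-- ===== CLAIM (what is proved, stated in full; the proofs are below) =====
def Claim_equal_is_included_loop : Prop := ∀ (el : List String) (loop_format_rep : List String), Dom_is_included_loop el loop_format_rep → Pre_is_included_loop el loop_format_rep → Spec_is_included_loop el loop_format_rep (is_included_loop el loop_format_rep)

-- ===== LEMMAS AND PROOFS =====

-- proof-only abstraction: both ports are greedy ordered-subsequence matching on a suffix list
def rep (n : Nat) (l : List String) : List String := (List.replicate n l).flatten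

def greedy : List String → List String → Bool
  | [], _ => true
  | e :: rest, s =>
    let s' := s.dropWhile (fun a => a != e)
    if s'.isEmpty then false else greedy rest s'

theorem rep_zero (l : List String) : rep 0 l = [] := rfl

theorem rep_succ (n : Nat) (l : List String) : rep (n + 1) l = l ++ rep n l := by
  simp [rep, List.replicate_succ]

theorem rep_add (a b : Nat) (l : List String) : rep (a + b) l = rep a l ++ rep b l := by
  unfold rep
  rw [List.replicate_add, List.flatten_append]

theorem rep_nil (n : Nat) : rep n ([] : List String) = [] := by
  induction n with
  | zero => rfl
  | succ k ih => simp [rep_succ, ih]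

-- A's inner loop vs dropWhile on the suffix
theorem findFrom_dropWhile (s2 : List String) (e : String) :
    ∀ n si, s2.length - si ≤ n →
      (match pyFindFrom s2 e si with
       | some i => i < s2.length ∧ (s2.drop si).dropWhile (fun a => a != e) = s2.drop i
       | none => (s2.drop si).dropWhile (fun a => a != e) = []) := by
  intro n
  induction n with
  | zero =>
    intro si hsi
    have h : s2.length ≤ si := by omega
    rw [pyFindFrom]
    simp [Nat.not_lt.mpr h, List.drop_eq_nil_of_le h]
  | succ k ih =>
    intro si hsi
    by_cases hlt : si < s2.length
    · rw [pyFindFrom]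
      simp only [hlt, dif_pos]
      have hdrop : s2.drop si = s2[si] :: s2.drop (si + 1) := by
        rw [List.drop_eq_getElem_cons hlt]
      by_cases heq : s2[si] = e
      · simp only [heq, if_pos rfl]
        refine ⟨hlt, ?_⟩
        rw [hdrop, heq]
        simp [List.dropWhile_cons]
      · simp only [if_neg heq]
        have := ih (si + 1) (by omega)
        rw [hdrop]
        have hne : (s2[si] != e) = true := by simp [heq]
        cases hfind : pyFindFrom s2 e (si + 1) with
        | some i =>
          rw [hfind] at this
          refine ⟨this.1, ?_⟩
          simp only [List.dropWhile_cons]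
          rw [if_pos hne]
          exact this.2
        | none =>
          rw [hfind] at this
          simp only [List.dropWhile_cons]
          rw [if_pos hne]
          exact this
    · rw [pyFindFrom]
      simp [hlt, List.drop_eq_nil_of_le (by omega : s2.length ≤ si)]

theorem isIncludedGo_greedy (s2 : List String) (el : List String) :
    ∀ si, isIncludedGo s2 el si = greedy el (s2.drop si) := by
  induction el with
  | nil => intro si; rfl
  | cons e rest ih =>
    intro si
    have h := findFrom_dropWhile s2 e (s2.length - si) si (le_refl _)
    cases hfind : pyFindFrom s2 e si with
    | some i =>
      rw [hfind] at h
      simp only [isIncludedGo, hfind, greedy]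
      rw [h.2, ih i]
      have : (s2.drop i).isEmpty = false := by
        simp [List.isEmpty_iff, List.drop_eq_nil_iff]
        omega
      simp [this]
    | none =>
      rw [hfind] at h
      simp [isIncludedGo, hfind, greedy, h]

-- A's doubling loop produces base ++ (2^k - 1) copies of the cycle
theorem unrollRep_eq (base : List String) (indR : Nat) (hind : indR ≤ base.length) :
    ∀ k j, unrollRep indR k (base ++ rep j (base.drop indR)) =
      base ++ rep ((j + 1) * 2 ^ k - 1) (base.drop indR) := by
  intro k
  induction k with
  | zero => intro j; simp [unrollRep, pow_zero]
  | succ m ih =>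
    intro j
    rw [unrollRep]
    have hdrop : (base ++ rep j (base.drop indR)).drop indR
        = base.drop indR ++ rep j (base.drop indR) := by
      rw [List.drop_append_of_le_length hind]
    rw [hdrop]
    have harr : base ++ rep j (base.drop indR) ++ (base.drop indR ++ rep j (base.drop indR))
        = base ++ rep (j + 1 + j) (base.drop indR) := by
      rw [rep_add, rep_add, rep_succ, rep_zero]
      simp
    rw [harr, ih (j + 1 + j)]
    congr 2
    have h : (j + 1 + j + 1) * 2 ^ m = (j + 1) * 2 ^ (m + 1) := by rw [pow_succ]; ring
    rw [h]

-- B's wrap-around scan vs dropWhile on base.drop pos ++ w copies of the cycle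
theorem scanWrap_dropWhile (base : List String) (indR : Nat) (e : String) (hind : indR ≤ base.length) :
    ∀ w n pos, base.length - pos ≤ n → pos ≤ base.length →
      (match scanWrap base indR e pos w with
       | some (p, w') => p < base.length ∧
           (base.drop pos ++ rep w (base.drop indR)).dropWhile (fun a => a != e)
             = base.drop p ++ rep w' (base.drop indR)
       | none => (base.drop pos ++ rep w (base.drop indR)).dropWhile (fun a => a != e) = []) := by
  intro w
  induction w with
  | zero =>
    intro n
    induction n with
    | zero =>
      intro pos hn hpos
      have hp : pos = base.length := by omega
      rw [scanWrap]
      simp [hp, List.drop_length, rep_zero]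
    | succ m ihn =>
      intro pos hn hpos
      by_cases hlt : pos < base.length
      · rw [scanWrap]
        simp only [hlt, dif_pos]
        have hdrop : base.drop pos = base[pos] :: base.drop (pos + 1) := by
          rw [List.drop_eq_getElem_cons hlt]
        by_cases heq : base[pos] = e
        · simp only [heq, if_pos rfl]
          refine ⟨hlt, ?_⟩
          rw [hdrop, heq]
          simp [List.dropWhile_cons]
        · simp only [if_neg heq]
          have := ihn (pos + 1) (by omega) (by omega)
          have hne : (base[pos] != e) = true := by simp [heq]
          cases hsc : scanWrap base indR e (pos + 1) 0 with
          | some pw =>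
            rw [hsc] at this
            obtain ⟨p, w'⟩ := pw
            refine ⟨this.1, ?_⟩
            rw [hdrop]
            simp only [List.cons_append, List.dropWhile_cons]
            rw [if_pos hne]
            exact this.2
          | none =>
            rw [hsc] at this
            show (base.drop pos ++ rep _ (base.drop indR)).dropWhile (fun a => a != e) = []
            rw [hdrop]
            simp only [List.cons_append, List.dropWhile_cons]
            rw [if_pos hne]
            exact this
      · have hp : pos = base.length := by omega
        rw [scanWrap]
        simp [hp, List.drop_length, rep_zero]
  | succ v ihw =>
    intro n
    induction n with
    | zero =>
      intro pos hn hpos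
      have hp : pos = base.length := by omega
      rw [scanWrap]
      subst hp
      simp only [lt_irrefl, dite_false, List.drop_length, List.nil_append]
      by_cases hR : indR < base.length
      · simp only [hR, if_pos rfl]
        have := ihw (base.length - indR) indR (le_refl _) (by omega)
        rw [rep_succ]
        have hdropi : base.drop indR ++ rep v (base.drop indR)
            = base.drop indR ++ rep v (base.drop indR) := rfl
        cases hsc : scanWrap base indR e indR v with
        | some pw =>
          rw [hsc] at this
          obtain ⟨p, w'⟩ := pw
          exact ⟨this.1, this.2⟩
        | none =>
          rw [hsc] at this
          exact this
      · have hRe : indR = base.length := by omega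
        simp only [hR, if_neg, ite_false]
        rw [hRe, List.drop_length, rep_nil]
        simp
    | succ m ihn =>
      intro pos hn hpos
      by_cases hlt : pos < base.length
      · rw [scanWrap]
        simp only [hlt, dif_pos]
        have hdrop : base.drop pos = base[pos] :: base.drop (pos + 1) := by
          rw [List.drop_eq_getElem_cons hlt]
        by_cases heq : base[pos] = e
        · simp only [heq, if_pos rfl]
          refine ⟨hlt, ?_⟩
          rw [hdrop, heq]
          simp [List.dropWhile_cons]
        · simp only [if_neg heq]
          have := ihn (pos + 1) (by omega) (by omega)
          have hne : (base[pos] != e) = true := by simp [heq]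
          cases hsc : scanWrap base indR e (pos + 1) (v + 1) with
          | some pw =>
            rw [hsc] at this
            obtain ⟨p, w'⟩ := pw
            refine ⟨this.1, ?_⟩
            rw [hdrop]
            simp only [List.cons_append, List.dropWhile_cons]
            rw [if_pos hne]
            exact this.2
          | none =>
            rw [hsc] at this
            show (base.drop pos ++ rep _ (base.drop indR)).dropWhile (fun a => a != e) = []
            rw [hdrop]
            simp only [List.cons_append, List.dropWhile_cons]
            rw [if_pos hne]
            exact this
      · -- pos = base.length: same as the n = 0 end-of-base case
        have hp : pos = base.length := by omega
        rw [scanWrap]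
        subst hp
        simp only [lt_irrefl, dite_false, List.drop_length, List.nil_append]
        by_cases hR : indR < base.length
        · simp only [hR, if_pos rfl]
          have := ihw (base.length - indR) indR (le_refl _) (by omega)
          rw [rep_succ]
          cases hsc : scanWrap base indR e indR v with
          | some pw =>
            rw [hsc] at this
            obtain ⟨p, w'⟩ := pw
            exact ⟨this.1, this.2⟩
          | none =>
            rw [hsc] at this
            exact this
        · have hRe : indR = base.length := by omega
          simp only [hR, if_neg, ite_false]
          rw [hRe, List.drop_length, rep_nil]
          simp

theorem wrapMatch_greedy (base : List String) (indR : Nat) (hind : indR ≤ base.length)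
    (el : List String) :
    ∀ pos w, pos ≤ base.length →
      wrapMatch base indR el pos w = greedy el (base.drop pos ++ rep w (base.drop indR)) := by
  induction el with
  | nil => intro pos w _; rfl
  | cons e rest ih =>
    intro pos w hpos
    have h := scanWrap_dropWhile base indR e hind w (base.length - pos) pos (le_refl _) hpos
    cases hsc : scanWrap base indR e pos w with
    | some pw =>
      rw [hsc] at h
      obtain ⟨p, w'⟩ := pw
      simp only [wrapMatch, hsc, greedy]
      rw [h.2, ih p w' (by omega)]
      have hne : (base.drop p ++ rep w' (base.drop indR)).isEmpty = false := by
        have : base.drop p ≠ [] := by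
          simp [List.drop_eq_nil_iff]
          omega
        simp [List.isEmpty_iff, this]
      simp [hne]
    | none =>
      rw [hsc] at h
      simp [wrapMatch, hsc, greedy, h]

-- dropWhile over repeated copies is empty when one copy yields empty
theorem dropWhile_rep_nil (cyc : List String) (e : String)
    (h : cyc.dropWhile (fun a => a != e) = []) :
    ∀ w, (rep w cyc).dropWhile (fun a => a != e) = [] := by
  intro w
  induction w with
  | zero => simp [rep_zero]
  | succ v ih =>
    rw [rep_succ, List.dropWhile_append, h]
    simp [ih]

-- CORE: greedy matching cannot tell w copies from w' copies once both exceed |el|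
theorem greedy_rep_stable (cyc : List String) :
    ∀ el (s : List String) w w', el.length ≤ w → el.length ≤ w' →
      greedy el (s ++ rep w cyc) = greedy el (s ++ rep w' cyc) := by
  intro el
  induction el with
  | nil => intro s w w' _ _; rfl
  | cons e rest ih =>
    intro s w w' hw hw'
    simp only [greedy]
    rw [List.dropWhile_append, List.dropWhile_append]
    cases hdw : s.dropWhile (fun a => a != e) with
    | cons x xs =>
      simp only [List.isEmpty_cons, List.cons_append, Bool.false_eq_true, if_false]
      exact ih (x :: xs) w w' (by simp at hw; omega) (by simp at hw'; omega)
    | nil =>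
      simp only [List.isEmpty_nil, if_true]
      cases hd : cyc.dropWhile (fun a => a != e) with
      | nil =>
        rw [dropWhile_rep_nil cyc e hd w, dropWhile_rep_nil cyc e hd w']
      | cons y ys =>
        obtain ⟨v, rfl⟩ : ∃ v, w = v + 1 := ⟨w - 1, by simp at hw; omega⟩
        obtain ⟨v', rfl⟩ : ∃ v', w' = v' + 1 := ⟨w' - 1, by simp at hw'; omega⟩
        rw [rep_succ, rep_succ, List.dropWhile_append, List.dropWhile_append, hd]
        simp only [List.isEmpty_cons, List.cons_append, Bool.false_eq_true, if_false]
        exact ih (y :: ys) v v' (by simp at hw; omega) (by simp at hw'; omega)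

-- ===== VERDICT (by name: the statement is the Claim_ definition above) =====
theorem is_included_loop_spec : Claim_equal_is_included_loop := by
  intro el lfr _ hpre
  obtain ⟨hne, hloop⟩ := hpre
  unfold Spec_is_included_loop is_included_loop is_included_loop_alt
  rw [PySem.List.pyGet?_neg_one]
  obtain ⟨last, hlast⟩ : ∃ last, lfr.getLast? = some last := by
    cases h : lfr.getLast? with
    | none => exact absurd (List.getLast?_eq_none_iff.mp h) hne
    | some x => exact ⟨x, rfl⟩
  rw [hlast]
  show (if PySem.Str.isIn "LOOP" last = true then
          match PySem.List.index? lfr (PySem.Str.slice last (some 10) none) with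
          | none => false
          | some indR =>
              is_included el (unrollRep indR el.length (PySem.List.slice lfr none (some (-1))))
        else is_included el lfr)
      = (if PySem.Str.isIn "LOOP" last = true then
          match PySem.List.index? lfr (PySem.Str.slice last (some 10) none) with
          | none => false
          | some indR =>
              wrapMatch (PySem.List.slice lfr none (some (-1))) indR el 0 el.length
        else wrapMatch lfr 0 el 0 0)
  simp only [hlast, Option.getD_some] at hloop
  by_cases hin : PySem.Str.isIn "LOOP" last
  · rw [if_pos hin, if_pos hin]
    have hmem := hloop hin
    obtain ⟨indR, hidx⟩ : ∃ k, PySem.List.index? lfr (PySem.Str.slice last (some 10) none) = some k := by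
      have := (PySem.List.index?_isSome_iff (xs := lfr) (v := PySem.Str.slice last (some 10) none)).mpr hmem
      cases h : PySem.List.index? lfr (PySem.Str.slice last (some 10) none) with
      | none => rw [h] at this; simp at this
      | some k => exact ⟨k, rfl⟩
    rw [hidx]
    obtain ⟨hk, _, _⟩ := PySem.List.getElem_of_index?_eq_some hidx
    rw [PySem.List.slice_to_neg_one]
    show is_included el (unrollRep indR el.length lfr.dropLast)
        = wrapMatch lfr.dropLast indR el 0 el.length
    have hind : indR ≤ lfr.dropLast.length := by
      rw [List.length_dropLast]; omega
    have hA : unrollRep indR el.length lfr.dropLast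
        = lfr.dropLast ++ rep (2 ^ el.length - 1) (lfr.dropLast.drop indR) := by
      have := unrollRep_eq lfr.dropLast indR hind el.length 0
      simpa [rep_zero] using this
    rw [is_included, isIncludedGo_greedy _ _ 0, List.drop_zero, hA]
    rw [wrapMatch_greedy lfr.dropLast indR hind el 0 el.length (by omega), List.drop_zero]
    exact greedy_rep_stable (lfr.dropLast.drop indR) el lfr.dropLast _ _
      (by have := Nat.lt_two_pow_self (n := el.length); omega) (le_refl _)
  · rw [if_neg hin, if_neg hin]
    rw [is_included, isIncludedGo_greedy _ _ 0, List.drop_zero]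
    rw [wrapMatch_greedy lfr 0 (by omega) el 0 0 (by omega), List.drop_zero, rep_zero]
    simp
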